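-- pv_equiv track=rewrite | github.com/drmnana/Robot-Agnostic-AI | backend/app/pdf_report.py | render_page
-- ===== SOURCE A (Python) =====
-- LEFT = 54
--
-- TOP = 742
--
-- LINE_HEIGHT = 15
--
-- def render_page(
--     lines: list[tuple[str, int]],
--     page_number: int,
--     page_count: int,
--     report_id: str,
--     evidence_hash: str,
-- ) -> str:
--     commands = ["BT", "/F1 11 Tf", f"{LEFT} {TOP} Td"]
--     cursor_size = 11
--     for text, size in lines:
--         if size != cursor_size:
--             commands.append(f"/F1 {size} Tf")
--             cursor_size = size
--         commands.append(f"({escape_pdf_text(text)}) Tj")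
--         commands.append(f"0 -{LINE_HEIGHT} Td")
--     footer = f"Report {report_id} | Evidence Package SHA-256: {evidence_hash} | Page {page_number} of {page_count}"
--     commands.extend([
--         "ET",
--         "BT",
--         "/F1 7 Tf",
--         f"{LEFT} 34 Td",
--         f"({escape_pdf_text(footer)}) Tj",
--         "ET",
--     ])
--     return "\n".join(commands)
--
-- def escape_pdf_text(text: str) -> str:
--     return str(text).replace("\\", "\\\\").replace("(", "\\(").replace(")", "\\)")
-- ===== SOURCE B (Python) =====
-- LEFT = 54
--
-- TOP = 742
--
-- LINE_HEIGHT = 15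
--
--
-- def escape_pdf_text(text: str) -> str:
--     return str(text).replace("\\", "\\\\").replace("(", "\\(").replace(")", "\\)")
--
--
-- def render_page(
--     lines: list[tuple[str, int]],
--     page_number: int,
--     page_count: int,
--     report_id: str,
--     evidence_hash: str,
-- ) -> str:
--     # Stage 1: run-length-compress the lines into maximal runs of consecutive
--     # equal font size, with a two-pointer scan.
--     runs = []
--     i, n = 0, len(lines)
--     while i < n:
--         size = lines[i][1]
--         j = i
--         while j < n and lines[j][1] == size:
--             j += 1
--         runs.append((size, [t for t, _ in lines[i:j]]))
--         i = j
--     # Stage 2: emit one Tf per run (suppressed when the size is already in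
--     # effect), then the run's text/advance commands.
--     out = ["BT", "/F1 11 Tf", f"{LEFT} {TOP} Td"]
--     last = 11
--     for size, texts in runs:
--         if size != last:
--             out.append(f"/F1 {size} Tf")
--             last = size
--         for t in texts:
--             out.append(f"({escape_pdf_text(t)}) Tj")
--             out.append(f"0 -{LINE_HEIGHT} Td")
--     footer = f"Report {report_id} | Evidence Package SHA-256: {evidence_hash} | Page {page_number} of {page_count}"
--     out += ["ET", "BT", "/F1 7 Tf", f"{LEFT} 34 Td", f"({escape_pdf_text(footer)}) Tj", "ET"]
--     return "\n".join(out)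
-- ===== Notes on version B (the rewrite author's own statement) =====
-- stated objective: alternative
-- what changed: Replaces A's single per-line loop with a per-line cursor comparison by a two-stage run-length algorithm: a two-pointer scan first compresses lines into maximal runs of equal size, then a run-level loop emits at most one Tf per run.
import Mathlib
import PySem

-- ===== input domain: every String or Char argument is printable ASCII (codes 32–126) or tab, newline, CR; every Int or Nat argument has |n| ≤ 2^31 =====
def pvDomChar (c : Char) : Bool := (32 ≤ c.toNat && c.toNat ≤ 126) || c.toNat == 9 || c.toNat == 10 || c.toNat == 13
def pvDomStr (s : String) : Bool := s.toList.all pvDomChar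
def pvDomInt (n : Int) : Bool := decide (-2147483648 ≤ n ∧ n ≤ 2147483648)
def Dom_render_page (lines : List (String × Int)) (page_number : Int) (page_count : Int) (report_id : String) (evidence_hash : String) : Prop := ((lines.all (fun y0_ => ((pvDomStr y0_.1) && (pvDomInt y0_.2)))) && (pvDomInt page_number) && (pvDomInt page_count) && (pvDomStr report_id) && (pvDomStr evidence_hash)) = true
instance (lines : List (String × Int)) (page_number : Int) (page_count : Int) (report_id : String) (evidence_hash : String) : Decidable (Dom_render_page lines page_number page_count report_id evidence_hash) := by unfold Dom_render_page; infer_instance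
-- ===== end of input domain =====

-- B replaces A's per-line cursor loop with a two-stage run-length algorithm:
-- a two-pointer scan groups lines into maximal runs of equal size, then a
-- run-level pass emits at most one Tf per run (alternative decomposition, same cost).


-- ===== PORT A =====
def pdfLEFT : Int := 54
def pdfTOP : Int := 742
def pdfLINE_HEIGHT : Int := 15

-- escape_pdf_text, shared by both Pythons verbatim
def escape_pdf_text (text : String) : String :=
  PySem.Str.replace (PySem.Str.replace (PySem.Str.replace text "\\" "\\\\") "(" "\\(") ")" "\\)"

-- one iteration of A's for-loop over (commands, cursor_size)
def renderStep (st : List String × Int) (tl : String × Int) : List String × Int :=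
  let st1 := if tl.2 ≠ st.2 then (st.1 ++ ["/F1 " ++ PySem.Int.toStr tl.2 ++ " Tf"], tl.2) else st
  (st1.1 ++ ["(" ++ escape_pdf_text tl.1 ++ ") Tj",
             "0 -" ++ PySem.Int.toStr pdfLINE_HEIGHT ++ " Td"], st1.2)

def render_page (lines : List (String × Int)) (page_number : Int) (page_count : Int) (report_id : String) (evidence_hash : String) : String :=
  let st := lines.foldl renderStep
    (["BT", "/F1 11 Tf", PySem.Int.toStr pdfLEFT ++ " " ++ PySem.Int.toStr pdfTOP ++ " Td"], 11)
  let footer := "Report " ++ report_id ++ " | Evidence Package SHA-256: " ++ evidence_hash ++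
    " | Page " ++ PySem.Int.toStr page_number ++ " of " ++ PySem.Int.toStr page_count
  PySem.Str.join "\n" (st.1 ++
    ["ET", "BT", "/F1 7 Tf", PySem.Int.toStr pdfLEFT ++ " 34 Td",
     "(" ++ escape_pdf_text footer ++ ") Tj", "ET"])

-- ===== PORT B =====
-- Stage 1: the two-pointer scan 'while j < n and lines[j][1] == size' is the
-- maximal prefix of equal size, i.e. takeWhile/dropWhile on the rest.
def groupRuns : List (String × Int) → List (Int × List String)
  | [] => []
  | (t, s) :: tl =>
      (s, t :: (tl.takeWhile (fun p => p.2 == s)).map (·.1)) ::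
        groupRuns (tl.dropWhile (fun p => p.2 == s))
termination_by l => l.length
decreasing_by
  simp only [List.length_cons]
  exact Nat.lt_succ_of_le (List.length_dropWhile_le _ _)

-- the two text/advance commands for one line
def lineCmds (t : String) : List String :=
  ["(" ++ escape_pdf_text t ++ ") Tj", "0 -" ++ PySem.Int.toStr pdfLINE_HEIGHT ++ " Td"]

-- Stage 2: the run-level loop with its tracked `last` size
def runCmds (last : Int) : List (Int × List String) → List String
  | [] => []
  | (s, ts) :: rest =>
      (if s ≠ last then ["/F1 " ++ PySem.Int.toStr s ++ " Tf"] else []) ++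
      ts.flatMap lineCmds ++ runCmds s rest

def render_page_alt (lines : List (String × Int)) (page_number : Int) (page_count : Int) (report_id : String) (evidence_hash : String) : String :=
  let body := runCmds 11 (groupRuns lines)
  let footer := "Report " ++ report_id ++ " | Evidence Package SHA-256: " ++ evidence_hash ++
    " | Page " ++ PySem.Int.toStr page_number ++ " of " ++ PySem.Int.toStr page_count
  PySem.Str.join "\n"
    (["BT", "/F1 11 Tf", PySem.Int.toStr pdfLEFT ++ " " ++ PySem.Int.toStr pdfTOP ++ " Td"] ++
     body ++
     ["ET", "BT", "/F1 7 Tf", PySem.Int.toStr pdfLEFT ++ " 34 Td",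
      "(" ++ escape_pdf_text footer ++ ") Tj", "ET"])

-- ===== PRECONDITION & SPEC =====
def Spec_render_page (lines : List (String × Int)) (page_number : Int) (page_count : Int) (report_id : String) (evidence_hash : String) (out : String) : Prop := out = render_page_alt lines page_number page_count report_id evidence_hash
instance (lines : List (String × Int)) (page_number : Int) (page_count : Int) (report_id : String) (evidence_hash : String) (out : String) : Decidable (Spec_render_page lines page_number page_count report_id evidence_hash out) := by unfold Spec_render_page; infer_instance

-- ===== CLAIM (what is proved, stated in full; the proofs are below) =====
def Claim_equal_render_page : Prop := ∀ (lines : List (String × Int)) (page_number : Int) (page_count : Int) (report_id : String) (evidence_hash : String), Dom_render_page lines page_number page_count report_id evidence_hash → Spec_render_page lines page_number page_count report_id evidence_hash (render_page lines page_number page_count report_id evidence_hash)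

-- ===== LEMMAS AND PROOFS =====

-- A's loop over lines that all have size s, starting with cursor already s,
-- appends the text/advance commands and never emits a Tf.
theorem fold_same (s : Int) (ts : List (String × Int)) (acc : List String)
    (h : ∀ p ∈ ts, p.2 = s) :
    ts.foldl renderStep (acc, s) = (acc ++ ts.flatMap (fun p => lineCmds p.1), s) := by
  induction ts generalizing acc with
  | nil => simp
  | cons p rest ih =>
      have hp : p.2 = s := h p (by simp)
      have hstep : renderStep (acc, s) p = (acc ++ lineCmds p.1, s) := by
        simp [renderStep, lineCmds, hp]
      simp only [List.foldl_cons, hstep, List.flatMap_cons]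
      rw [ih _ (fun q hq => h q (by simp [hq])), List.append_assoc]

-- A's loop over the whole list equals acc followed by B's run-level emission.
theorem fold_runs : ∀ (lines : List (String × Int)) (acc : List String) (c : Int),
    (lines.foldl renderStep (acc, c)).1 = acc ++ runCmds c (groupRuns lines)
  | [], acc, c => by simp [groupRuns, runCmds]
  | (t, s) :: tl, acc, c => by
      have hstep : renderStep (acc, c) (t, s) =
          (acc ++ (if s ≠ c then ["/F1 " ++ PySem.Int.toStr s ++ " Tf"] else []) ++ lineCmds t, s) := by
        by_cases h : s = c <;> simp [renderStep, lineCmds, h]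
      have hsplit : tl = tl.takeWhile (fun p => p.2 == s) ++ tl.dropWhile (fun p => p.2 == s) :=
        (List.takeWhile_append_dropWhile).symm
      have hsame : ∀ p ∈ tl.takeWhile (fun p => p.2 == s), p.2 = s := by
        intro p hp
        have := List.mem_takeWhile_imp hp
        simpa using this
      calc (((t, s) :: tl).foldl renderStep (acc, c)).1
          = (tl.foldl renderStep (renderStep (acc, c) (t, s))).1 := by
            simp [List.foldl_cons]
        _ = ((tl.takeWhile (fun p => p.2 == s) ++ tl.dropWhile (fun p => p.2 == s)).foldl
              renderStep (renderStep (acc, c) (t, s))).1 := by rw [← hsplit]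
        _ = acc ++ runCmds c (groupRuns ((t, s) :: tl)) := by
            rw [List.foldl_append, hstep, fold_same s _ _ hsame,
              fold_runs (tl.dropWhile (fun p => p.2 == s)) _ s]
            simp [groupRuns, runCmds, lineCmds, List.flatMap_map,
              List.append_assoc]
termination_by lines => lines.length
decreasing_by
  simp only [List.length_cons]
  exact Nat.lt_succ_of_le (List.length_dropWhile_le _ _)

-- ===== VERDICT (by name: the statement is the Claim_ definition above) =====
theorem render_page_spec : Claim_equal_render_page := by
  intro lines page_number page_count report_id evidence_hash _
  simp only [Spec_render_page, render_page, render_page_alt, fold_runs, List.append_assoc]
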